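-- pv_equiv track=rewrite | github.com/DarpitParikh/CAMPS | allocation/views.py | parse_rooms
-- ===== SOURCE A (Python) =====
-- def parse_rooms(room_text):
--     rooms = []
--     seen = set()
--
--     for part in room_text.split(','):
--         part = part.strip()
--
--         if '-' in part:
--             start, end = part.split('-')
--             for r in range(int(start), int(end) + 1):
--                 room = str(r)
--                 if room not in seen:
--                     rooms.append(room)
--                     seen.add(room)
--         else:
--             if part and part not in seen:
--                 rooms.append(part)
--                 seen.add(part)
--
--     return rooms
-- ===== SOURCE B (Python) =====
-- def parse_rooms(room_text):
--     # Phase 1: flatten into the full left-to-right token stream.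
--     def tokens_of(part):
--         part = part.strip()
--         if '-' in part:
--             start, end = part.split('-')
--             return [str(r) for r in range(int(start), int(end) + 1)]
--         return [part] if part else []
--
--     tokens = [t for part in room_text.split(',') for t in tokens_of(part)]
--
--     # Phase 2: build the deduped result BACK-TO-FRONT: walking the token
--     # stream from the right, prepend the token and drop its later duplicates
--     # from the result built so far.  No seen-set / dict is maintained.
--     result = []
--     for t in reversed(tokens):
--         result = [t] + [x for x in result if x != t]
--     return result
-- ===== Notes on version B (the rewrite author's own statement) =====
-- stated objective: alternative
-- what changed: Replaces A's single pass that interleaves range expansion with a rooms-list/seen-set pair by two phases: flatten the whole token stream first, then build the deduplicated result back-to-front by walking the tokens from the right, prepending each token and filtering its later duplicates out of the partial result (no seen set or dict at all).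
import Mathlib
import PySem

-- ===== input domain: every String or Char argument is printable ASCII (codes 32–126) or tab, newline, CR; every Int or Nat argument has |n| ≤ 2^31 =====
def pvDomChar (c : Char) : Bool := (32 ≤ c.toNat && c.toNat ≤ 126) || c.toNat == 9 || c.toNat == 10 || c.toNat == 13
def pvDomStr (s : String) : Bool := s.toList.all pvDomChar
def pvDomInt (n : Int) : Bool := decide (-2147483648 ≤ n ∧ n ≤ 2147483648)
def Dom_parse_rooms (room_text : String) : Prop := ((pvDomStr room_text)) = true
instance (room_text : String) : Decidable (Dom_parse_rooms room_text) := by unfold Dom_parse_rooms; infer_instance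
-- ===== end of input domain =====

-- B replaces A's interleaved expand-plus-seen-set loop by two phases: flatten the token
-- stream, then build the deduped result back-to-front by filtering later duplicates
-- (objective: alternative — no seen structure, different traversal direction; not faster).

-- s.split(sep) for a NONEMPTY literal sep: PySem.Str.split? is none only for the empty
-- separator, so .getD [] never fires on the call sites below (each sep is a one-character
-- literal); exact there.
def pvSplit (s sep : String) : List String := (PySem.Str.split? s sep).getD []

-- ===== PORT A =====
-- A's loop body (one part): expand or take the part, appending each token only if unseen.
def pvStepA (st : List String × PySem.Set String) (part : String) :
    List String × PySem.Set String :=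
  let part := PySem.Str.strip part
  if PySem.Str.isIn "-" part then
    match pvSplit part "-" with
    | [s, e] =>
      match PySem.Int.ofStr? s, PySem.Int.ofStr? e with
      | some a, some b =>
        (PySem.List.pyRange a (b + 1) 1).foldl
          (fun st r =>
            let room := PySem.Int.toStr r
            if PySem.Set.contains st.2 room then st
            else (st.1 ++ [room], PySem.Set.add st.2 room)) st
      | _, _ => st      -- int() ValueError: excluded by Pre_
    | _ => st           -- unpacking ValueError: excluded by Pre_
  else
    if part ≠ "" && !(PySem.Set.contains st.2 part) then
      (st.1 ++ [part], PySem.Set.add st.2 part)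
    else st

-- A's single pass: state is (rooms, seen).
def parse_rooms (room_text : String) : List String :=
  ((pvSplit room_text ",").foldl pvStepA ([], PySem.Set.empty)).1

-- ===== PORT B =====
-- Source B's tokens_of(part): tokens contributed by one part
def pvTokensOf (part : String) : List String :=
  let part := PySem.Str.strip part
  if PySem.Str.isIn "-" part then
    match pvSplit part "-" with
    | [s, e] =>
      match PySem.Int.ofStr? s, PySem.Int.ofStr? e with
      | some a, some b => (PySem.List.pyRange a (b + 1) 1).map PySem.Int.toStr
      | _, _ => []          -- int() ValueError: excluded by Pre_
    | _ => []               -- unpacking ValueError: excluded by Pre_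
  else if part ≠ "" then [part] else []

-- B's two phases: the flat token-stream comprehension, then the back-to-front
-- 'for t in reversed(tokens): result = [t] + [x for x in result if x != t]' loop.
def parse_rooms_alt (room_text : String) : List String :=
  let tokens := (pvSplit room_text ",").flatMap pvTokensOf
  tokens.reverse.foldl (fun res t => t :: res.filter (fun x => x ≠ t)) []

-- ===== PRECONDITION & SPEC =====
-- Pre_ excludes exactly the inputs where Python A raises ValueError: every stripped part that
-- contains '-' must split into exactly two pieces, both parseable by int().
def Pre_parse_rooms (room_text : String) : Prop :=
  ∀ p ∈ pvSplit room_text ",",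
    PySem.Str.isIn "-" (PySem.Str.strip p) = true →
      (pvSplit (PySem.Str.strip p) "-").length = 2 ∧
      ∀ q ∈ pvSplit (PySem.Str.strip p) "-", (PySem.Int.ofStr? q).isSome = true
instance (room_text : String) : Decidable (Pre_parse_rooms room_text) := by
  unfold Pre_parse_rooms; infer_instance

def pvWitness_parse_rooms : String := "1-3, 7, 2"

def Spec_parse_rooms (room_text : String) (out : List String) : Prop := out = parse_rooms_alt room_text
instance (room_text : String) (out : List String) : Decidable (Spec_parse_rooms room_text out) := by unfold Spec_parse_rooms; infer_instance

-- ===== CLAIM (what is proved, stated in full; the proofs are below) =====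
def Claim_equal_parse_rooms : Prop := ∀ (room_text : String), Dom_parse_rooms room_text → Pre_parse_rooms room_text → Spec_parse_rooms room_text (parse_rooms room_text)

-- ===== LEMMAS AND PROOFS =====

-- A's inner "append token if unseen" loop, started on a diagonal state (rooms = seen as lists),
-- is exactly PySem.Set.update by the emitted token list.
lemma pvInner_eq {α : Type} (f : α → String) (l : List α) (s : PySem.Set String) :
    l.foldl
      (fun (st : List String × PySem.Set String) r =>
        let room := f r
        if PySem.Set.contains st.2 room then st
        else (st.1 ++ [room], PySem.Set.add st.2 room)) (s, s)
      = (PySem.Set.update s (l.map f), PySem.Set.update s (l.map f)) := by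
  induction l generalizing s with
  | nil => simp [PySem.Set.update]
  | cons t ts ih =>
    simp only [List.foldl_cons, List.map_cons, PySem.Set.update_cons]
    by_cases h : f t ∈ s
    · have hadd : PySem.Set.add s (f t) = s := by simp [PySem.Set.add, h]
      have hc : PySem.Set.contains s (f t) = true := by simpa using h
      simp only [hc, if_true]
      rw [hadd]
      exact ih s
    · have hadd : PySem.Set.add s (f t) = s ++ [f t] := by simp [PySem.Set.add, h]
      have hc : PySem.Set.contains s (f t) = false := by simpa using h
      simp only [hc, Bool.false_eq_true, if_false]
      rw [hadd, ← hadd]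
      exact ih _

-- one A-step on a diagonal state = Set.update by Source B's tokens_of that part
lemma pvStepA_diag (s : PySem.Set String) (part : String) :
    pvStepA (s, s) part = (PySem.Set.update s (pvTokensOf part), PySem.Set.update s (pvTokensOf part)) := by
  simp only [pvStepA, pvTokensOf]
  generalize PySem.Str.strip part = q
  by_cases hin : PySem.Str.isIn "-" q = true
  · simp only [hin, if_true]
    generalize pvSplit q "-" = l
    rcases l with _ | ⟨x, _ | ⟨y, _ | ⟨z, zs⟩⟩⟩
    · rfl
    · rfl
    · cases ha : PySem.Int.ofStr? x with
      | none =>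
        cases hb : PySem.Int.ofStr? y <;> simp [ha, hb, PySem.Set.update]
      | some a =>
        cases hb : PySem.Int.ofStr? y with
        | none => simp [ha, hb, PySem.Set.update]
        | some b =>
          have h := pvInner_eq PySem.Int.toStr (PySem.List.pyRange a (b + 1) 1) s
          simp only [ha, hb]
          exact h
    · rfl
  · simp only [Bool.not_eq_true] at hin
    simp only [hin, Bool.false_eq_true, if_false]
    by_cases hne : q = ""
    · simp [hne, PySem.Set.update]
    · by_cases hm : q ∈ s
      · have hc : PySem.Set.contains s q = true := by
          simpa [PySem.Set.contains_iff] using hm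
        have hupd : PySem.Set.update s [q] = s := by
          simp [PySem.Set.update, PySem.Set.add, hm]
        simp [hne, hm, hupd]
      · simp [hne, hm, PySem.Set.update, PySem.Set.add]

-- A's whole loop from a diagonal state stays diagonal and performs one Set.update per part
lemma pvOuter_eq (parts : List String) (s : PySem.Set String) :
    parts.foldl pvStepA (s, s)
      = (parts.foldl (fun s p => PySem.Set.update s (pvTokensOf p)) s,
         parts.foldl (fun s p => PySem.Set.update s (pvTokensOf p)) s) := by
  induction parts generalizing s with
  | nil => rfl
  | cons p ps ih =>
    simp only [List.foldl_cons, pvStepA_diag]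
    exact ih _

-- folding Set.update part-by-part = one Set.update by the flattened token stream
lemma pvUpdate_flat (parts : List String) (s : PySem.Set String) :
    parts.foldl (fun s p => PySem.Set.update s (pvTokensOf p)) s
      = PySem.Set.update s (parts.flatMap pvTokensOf) := by
  induction parts generalizing s with
  | nil => simp [PySem.Set.update]
  | cons p ps ih =>
    simp only [List.foldl_cons, List.flatMap_cons]
    rw [ih, PySem.Set.update, PySem.Set.update, PySem.Set.update, List.foldl_append]

-- B's back-to-front filter loop computes the first-occurrence dedup (set-of-list) of the stream
lemma pvBack_eq (toks : List String) :
    toks.reverse.foldl (fun res t => t :: res.filter (fun x => x ≠ t)) []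
      = PySem.Set.ofList toks := by
  rw [List.foldl_reverse]
  induction toks with
  | nil => rfl
  | cons t ts ih =>
    rw [List.foldr_cons, ih, PySem.Set.ofList_cons]
    simp only [PySem.Set.discard]
    congr 1
    refine List.filter_congr ?_
    intro y _
    by_cases h : y = t <;> simp [h]

-- ===== VERDICT (by name: the statement is the Claim_ definition above) =====
theorem parse_rooms_spec : Claim_equal_parse_rooms := by
  intro room_text _ _
  unfold Spec_parse_rooms parse_rooms parse_rooms_alt
  rw [show (([], PySem.Set.empty) : List String × PySem.Set String)
        = ((PySem.Set.empty : PySem.Set String), (PySem.Set.empty : PySem.Set String)) from rfl]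
  rw [pvOuter_eq, pvUpdate_flat, pvBack_eq]
  simp [PySem.Set.update_nil_left, PySem.Set.empty]
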